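-- pv_equiv track=rewrite | github.com/zyc9569/Python-Pratice | Enigma Decryption.py | is_valid_guess
-- ===== SOURCE A (Python) =====
-- number = ["0","1","2","3","4","5","6","7","8","9"] #用来检测输入内容是否为数字
--
-- def is_valid_guess(guess):
--     """检查输入是否有效的四位不重复数字密码"""
--     if len(guess) != 4:
--         return False, "请输入四位不重复数字的密码"
--
--     for char in guess:
--         if char not in number:
--             return False, "请输入四位不重复数字的密码"
--
--     if guess[0] == guess[1] or guess[0] == guess[2] or guess[0] == guess[3] or guess[1] == guess[2] or guess[1] == guess[3] or guess[2] == guess[3]: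
--         return False, "请输入四位不重复数字的密码"
--
--     return True, ""
-- ===== SOURCE B (Python) =====
-- number = ["0","1","2","3","4","5","6","7","8","9"] #用来检测输入内容是否为数字
--
-- def is_valid_guess(guess):
--     """检查输入是否有效的四位不重复数字密码"""
--     msg = "请输入四位不重复数字的密码"
--     if len(guess) != 4:
--         return False, msg
--
--     def ok(rest, seen):
--         # single recursive pass: digit check and duplicate check interleaved
--         if not rest:
--             return True
--         c = rest[0]
--         return c in number and c not in seen and ok(rest[1:], seen + [c])
--
--     if ok(list(guess), []):
--         return True, ""
--     return False, msg
-- ===== Notes on version B (the rewrite author's own statement) =====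
-- stated objective: alternative
-- what changed: A's three staged passes (length guard, a digit-membership loop over all chars, then six explicit pairwise comparisons) are replaced by one recursive pass that carries an accumulator of already-visited characters and checks digit-membership and duplication of each character in the same step.
import Mathlib
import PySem

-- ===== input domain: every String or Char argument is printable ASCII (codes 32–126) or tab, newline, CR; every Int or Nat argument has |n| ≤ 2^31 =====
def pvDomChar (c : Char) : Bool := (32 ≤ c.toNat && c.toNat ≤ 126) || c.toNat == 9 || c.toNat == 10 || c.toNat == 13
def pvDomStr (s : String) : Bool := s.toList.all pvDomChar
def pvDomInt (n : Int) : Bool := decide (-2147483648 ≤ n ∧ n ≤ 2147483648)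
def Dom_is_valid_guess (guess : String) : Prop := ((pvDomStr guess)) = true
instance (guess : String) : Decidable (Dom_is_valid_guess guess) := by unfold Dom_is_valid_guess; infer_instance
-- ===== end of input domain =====

-- B replaces A's three staged passes (length guard, digit loop, six pairwise comparisons)
-- by a single recursive pass carrying an accumulator of already-visited characters (objective: alternative).

-- ===== PORT A =====
def pvNumber : List Char := ['0','1','2','3','4','5','6','7','8','9']

def pvMsg : String := "请输入四位不重复数字的密码"

-- the 'for char in guess' loop: returns the early result if some char is not a digit
def pvLoopA : List Char → Option (Bool × String)
  | [] => none
  | c :: rest => if ¬ (c ∈ pvNumber) then some (false, pvMsg) else pvLoopA rest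

def is_valid_guess (guess : String) : Bool × String :=
  let cs := guess.toList
  if cs.length ≠ 4 then (false, pvMsg)
  else
    match pvLoopA cs with
    | some r => r
    | none =>
      let g0 := (PySem.List.pyGet? cs 0).getD ' '   -- indices 0..3 are in range: length = 4
      let g1 := (PySem.List.pyGet? cs 1).getD ' '
      let g2 := (PySem.List.pyGet? cs 2).getD ' '
      let g3 := (PySem.List.pyGet? cs 3).getD ' '
      if g0 = g1 ∨ g0 = g2 ∨ g0 = g3 ∨ g1 = g2 ∨ g1 = g3 ∨ g2 = g3 then (false, pvMsg)
      else (true, "")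

-- ===== PORT B =====
-- the recursive helper 'ok(rest, seen)'
def pvOk : List Char → List Char → Bool
  | [], _ => true
  | c :: rest, seen => pvNumber.contains c && !(seen.contains c) && pvOk rest (seen ++ [c])

def is_valid_guess_alt (guess : String) : Bool × String :=
  let cs := guess.toList
  if cs.length ≠ 4 then (false, pvMsg)
  else if pvOk cs [] then (true, "") else (false, pvMsg)

-- ===== PRECONDITION & SPEC =====
def Spec_is_valid_guess (guess : String) (out : Bool × String) : Prop := out = is_valid_guess_alt guess
instance (guess : String) (out : Bool × String) : Decidable (Spec_is_valid_guess guess out) := by unfold Spec_is_valid_guess; infer_instance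

-- ===== CLAIM (what is proved, stated in full; the proofs are below) =====
def Claim_equal_is_valid_guess : Prop := ∀ (guess : String), Dom_is_valid_guess guess → Spec_is_valid_guess guess (is_valid_guess guess)

-- ===== LEMMAS AND PROOFS =====

theorem is_valid_guess_eq (guess : String) :
    is_valid_guess guess = is_valid_guess_alt guess := by
  unfold is_valid_guess is_valid_guess_alt
  match h : guess.toList with
  | [] => simp
  | [a] => simp
  | [a, b] => simp
  | [a, b, c] => simp
  | a :: b :: c :: d :: e :: t => simp
  | [a, b, c, d] =>
    simp only [List.length_cons, List.length_nil]
    by_cases ha : a ∈ pvNumber <;> by_cases hb : b ∈ pvNumber <;>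
      by_cases hc : c ∈ pvNumber <;> by_cases hd : d ∈ pvNumber <;>
      simp [pvLoopA, pvOk, ha, hb, hc, hd, PySem.List.pyGet?, PySem.List.pyIdx?,
        List.contains_eq_mem]
    by_cases h1 : a = b <;> by_cases h2 : a = c <;> by_cases h3 : a = d <;>
      by_cases h4 : b = c <;> by_cases h5 : b = d <;> by_cases h6 : c = d <;>
      simp_all <;> tauto

-- ===== VERDICT (by name: the statement is the Claim_ definition above) =====
theorem is_valid_guess_spec : Claim_equal_is_valid_guess := by
  intro guess _
  unfold Spec_is_valid_guess
  exact is_valid_guess_eq guess
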